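-- pv_equiv track=rewrite | github.com/hamcheeseburger/coding | programmers/뉴스_클러스터링.py | makeSplit
-- ===== SOURCE A (Python) =====
-- def makeSplit(string): # 문자열을 순차적으로 2개씩 나누는 과정
--     string = string.lower()
--     str_list = []
--     index = 0
--     while index <= len(string) - 2:
--         st = string[index:index + 2]
--         if st.isalpha():
--             str_list.append(st)
--         index += 1
--     return str_list
-- ===== SOURCE B (Python) =====
-- def makeSplit(string):
--     s = string.lower()
--     # pass 1: collect maximal runs of alphabetic characters
--     runs = []
--     cur = []
--     for ch in s:
--         if ch.isalpha():
--             cur.append(ch)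
--         else:
--             if cur:
--                 runs.append(cur)
--             cur = []
--     if cur:
--         runs.append(cur)
--     # pass 2: expand each run into its consecutive 2-grams
--     out = []
--     for run in runs:
--         for x, y in zip(run, run[1:]):
--             out.append(x + y)
--     return out
-- ===== Notes on version B (the rewrite author's own statement) =====
-- stated objective: alternative
-- what changed: Replaces the sliding-window scan that slices and isalpha-tests every adjacent pair with a two-phase decomposition: first collect maximal alphabetic runs, then expand each run into its consecutive bigrams via zip (avoids per-position slicing/str.isalpha calls).
import Mathlib
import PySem

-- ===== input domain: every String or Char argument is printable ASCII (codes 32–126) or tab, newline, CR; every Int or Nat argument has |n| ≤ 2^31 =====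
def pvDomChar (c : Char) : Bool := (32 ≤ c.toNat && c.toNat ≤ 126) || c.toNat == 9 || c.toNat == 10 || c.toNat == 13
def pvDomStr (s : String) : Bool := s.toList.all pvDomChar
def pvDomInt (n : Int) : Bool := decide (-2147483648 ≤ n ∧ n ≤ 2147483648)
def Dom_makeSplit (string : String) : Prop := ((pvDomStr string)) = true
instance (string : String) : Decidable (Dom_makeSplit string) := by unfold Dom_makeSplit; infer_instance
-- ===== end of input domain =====

-- B replaces the per-pair slice-and-isalpha sliding window with a runs-then-bigrams decomposition; alternative structure, same cost.


-- ===== PORT A =====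
-- while index <= len(string) - 2: st = string[index:index+2]; if st.isalpha(): append; index += 1
-- (index starts at 0 and only grows, so the Int condition index ≤ len-2 is index + 2 ≤ len over Nat)
def makeSplitLoop (s : List Char) (index : Nat) (acc : List String) : List String :=
  if index + 2 ≤ s.length then
    let st := PySem.List.slice s (some (index : Int)) (some ((index : Int) + 2))
    makeSplitLoop s (index + 1) (if PySem.Chars.strIsalpha st then acc ++ [String.ofList st] else acc)
  else acc
termination_by s.length - index

def makeSplit (string : String) : List String :=
  makeSplitLoop (PySem.Chars.lower string.toList) 0 []

-- ===== PORT B =====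
-- one step of B's first loop: extend the current run, or close it
def pvStep (st : List (List Char) × List Char) (c : Char) : List (List Char) × List Char :=
  if PySem.Chars.isalpha c then (st.1, st.2 ++ [c])
  else if st.2 = [] then (st.1, []) else (st.1 ++ [st.2], [])

-- for x, y in zip(run, run[1:]): out.append(x + y)
def pvBigrams (run : List Char) : List String :=
  (run.zip run.tail).map (fun p => String.ofList [p.1, p.2])

def makeSplit_alt (string : String) : List String :=
  let s := PySem.Chars.lower string.toList
  let st := s.foldl pvStep ([], [])
  let runs := if st.2 = [] then st.1 else st.1 ++ [st.2]
  runs.flatMap pvBigrams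

-- ===== PRECONDITION & SPEC =====
def Spec_makeSplit (string : String) (out : List String) : Prop := out = makeSplit_alt string
instance (string : String) (out : List String) : Decidable (Spec_makeSplit string out) := by unfold Spec_makeSplit; infer_instance

-- ===== CLAIM (what is proved, stated in full; the proofs are below) =====
def Claim_equal_makeSplit : Prop := ∀ (string : String), Dom_makeSplit string → Spec_makeSplit string (makeSplit string)

-- ===== LEMMAS AND PROOFS =====

-- all adjacent bigrams of a list, structurally
def pvAdj : List Char → List String
  | a :: b :: r => String.ofList [a, b] :: pvAdj (b :: r)
  | _ => []

-- A's result, structurally: the kept bigrams of a character list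
def pvPairs : List Char → List String
  | a :: b :: r => (if PySem.Chars.strIsalpha [a, b] then [String.ofList [a, b]] else []) ++ pvPairs (b :: r)
  | _ => []

-- B's first loop as a structural recursion on the remaining input, given the current run
def pvG : List Char → List Char → List String
  | cur, [] => pvBigrams cur
  | cur, c :: cs => if PySem.Chars.isalpha c then pvG (cur ++ [c]) cs else pvBigrams cur ++ pvG [] cs

theorem pvBigrams_eq_adj (l : List Char) : pvBigrams l = pvAdj l := by
  induction l with
  | nil => rfl
  | cons a t ih =>
    cases t with
    | nil => rfl
    | cons b r =>
      simp only [pvBigrams, List.tail, List.zip, List.zipWith, List.map] at ih ⊢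
      simp [pvAdj, ih]

theorem pvAdj_boundary (ys rest : List Char) (x : Char) :
    pvAdj (ys ++ x :: rest) = pvAdj (ys ++ [x]) ++ pvAdj (x :: rest) := by
  induction ys with
  | nil => simp [pvAdj]
  | cons y t ih =>
    cases t with
    | nil => cases rest <;> simp [pvAdj]
    | cons z t' => simpa [pvAdj] using ih

theorem pvPairs_not_alpha (c : Char) (cs : List Char) (h : PySem.Chars.isalpha c = false) :
    pvPairs (c :: cs) = pvPairs cs := by
  cases cs with
  | nil => rfl
  | cons d r => simp [pvPairs, PySem.Chars.strIsalpha, h]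

theorem makeSplitLoop_eq_aux (n : Nat) : ∀ (s : List Char) (index : Nat) (acc : List String),
    s.length - index ≤ n → makeSplitLoop s index acc = acc ++ pvPairs (s.drop index) := by
  induction n with
  | zero =>
    intro s index acc h
    rw [makeSplitLoop, if_neg (by omega)]
    rw [List.drop_eq_nil_of_le (by omega)]
    simp [pvPairs]
  | succ n ih =>
    intro s index acc h
    by_cases hc : index + 2 ≤ s.length
    · have hd : s.drop index = s[index] :: s[index + 1] :: s.drop (index + 2) := by
        rw [List.drop_eq_getElem_cons (by omega), List.drop_eq_getElem_cons (by omega)]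
        norm_num
      have hd1 : s.drop (index + 1) = s[index + 1] :: s.drop (index + 2) := by
        rw [List.drop_eq_getElem_cons (by omega)]
        norm_num
      have hst : PySem.List.slice s (some (index : Int)) (some ((index : Int) + 2))
          = [s[index], s[index + 1]] := by
        have h2 : ((index : Int) + 2) = ((index : Int) + ((2 : Nat) : Int)) := by push_cast; ring
        rw [h2, PySem.List.slice_natCast_add, hd]
        rfl
      rw [makeSplitLoop, if_pos hc]
      simp only [hst]
      rw [ih s (index + 1) _ (by omega), hd, hd1, pvPairs]
      split <;> simp
    · rw [makeSplitLoop, if_neg hc]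
      have hlen : (s.drop index).length ≤ 1 := by simp; omega
      match hdrop : s.drop index with
      | [] => simp [pvPairs]
      | [a] => simp [pvPairs]
      | a :: b :: r => rw [hdrop] at hlen; simp at hlen

theorem makeSplitLoop_eq (s : List Char) (index : Nat) (acc : List String) :
    makeSplitLoop s index acc = acc ++ pvPairs (s.drop index) :=
  makeSplitLoop_eq_aux (s.length - index) s index acc le_rfl

theorem pvFold_eq (cs : List Char) (runs : List (List Char)) (cur : List Char) :
    (let st := cs.foldl pvStep (runs, cur);
     (if st.2 = [] then st.1 else st.1 ++ [st.2]).flatMap pvBigrams)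
      = runs.flatMap pvBigrams ++ pvG cur cs := by
  induction cs generalizing runs cur with
  | nil =>
    by_cases h : cur = [] <;> simp [pvG, h, pvBigrams]
  | cons c cs ih =>
    simp only [List.foldl_cons]
    by_cases ha : PySem.Chars.isalpha c
    · simp only [pvStep, if_pos ha]
      rw [ih]
      simp [pvG, ha]
    · simp only [pvStep, pvG, eq_false_of_ne_true (by simpa using ha)]
      by_cases hc : cur = []
      · simp only [hc]
        rw [ih]
        simp [pvBigrams]
      · simp only [if_neg hc]
        rw [ih]
        simp

theorem pvKM (n : Nat) : ∀ cs : List Char, cs.length ≤ n →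
    ((∀ (ys : List Char) (x : Char), PySem.Chars.isalpha x = true →
        pvG (ys ++ [x]) cs = pvAdj (ys ++ [x]) ++ pvPairs (x :: cs)) ∧
      pvG [] cs = pvPairs cs) := by
  induction n with
  | zero =>
    intro cs hcs
    have : cs = [] := List.eq_nil_of_length_eq_zero (Nat.le_zero.mp hcs)
    subst this
    constructor
    · intro ys x _
      simp [pvG, pvPairs, pvBigrams_eq_adj]
    · simp [pvG, pvPairs, pvBigrams]
  | succ n ih =>
    intro cs hcs
    cases cs with
    | nil =>
      constructor
      · intro ys x _
        simp [pvG, pvPairs, pvBigrams_eq_adj]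
      · simp [pvG, pvPairs, pvBigrams]
    | cons c cs' =>
      have hlen : cs'.length ≤ n := by simpa using hcs
      have ihK := (ih cs' hlen).1
      have ihM := (ih cs' hlen).2
      constructor
      · intro ys x hx
        by_cases hc : PySem.Chars.isalpha c
        · have hK := ihK (ys ++ [x]) c hc
          have hb : pvAdj (ys ++ [x] ++ [c]) = pvAdj (ys ++ [x]) ++ [String.ofList [x, c]] := by
            have h1 := pvAdj_boundary ys [c] x
            simpa [pvAdj] using h1
          rw [pvG, if_pos hc, hK, hb]
          simp [pvPairs, PySem.Chars.strIsalpha, hx, hc]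
        · have hc' : PySem.Chars.isalpha c = false := eq_false_of_ne_true hc
          have h1 : pvPairs (x :: c :: cs') = pvPairs cs' := by
            simp [pvPairs, PySem.Chars.strIsalpha, hc', pvPairs_not_alpha c cs' hc']
          rw [pvG, if_neg hc, ihM, pvBigrams_eq_adj, h1]
      · by_cases hc : PySem.Chars.isalpha c
        · have hK := ihK [] c hc
          rw [pvG, if_pos hc]
          simpa [pvAdj] using hK
        · have hc' : PySem.Chars.isalpha c = false := eq_false_of_ne_true hc
          rw [pvG, if_neg hc, ihM, pvPairs_not_alpha c cs' hc']
          simp [pvBigrams]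

-- ===== VERDICT (by name: the statement is the Claim_ definition above) =====
theorem makeSplit_spec : Claim_equal_makeSplit := by
  intro string _
  show makeSplit string = makeSplit_alt string
  unfold makeSplit makeSplit_alt
  rw [makeSplitLoop_eq, pvFold_eq]
  simpa using (pvKM (PySem.Chars.lower string.toList).length (PySem.Chars.lower string.toList) le_rfl).2.symm
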